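-- pv_equiv track=rewrite | github.com/GTerglav/programiranje-1 | 11-deli-in-vladaj/vaje/deli_in_vladaj.py | zlij
-- ===== SOURCE A (Python) =====
-- def zlij(target, begin, end, list_1, list_2):
--     for i in range(begin, end):
--         if list_1 == []:
--             target[i] = list_2[0]
--             list_2 = list_2[1:]
--         elif list_2 == []:
--             target[i] = list_1[0]
--             List_1 = list_1[1:]
--         else:
--             element = min(list_1[0], list_2[0])
--             if element == list_1[0]:
--                 list_1 = list_1[1:]
--             else:
--                 list_2 = list_2[1:]
--             target[i] = element
--     return target
-- ===== SOURCE B (Python) =====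
-- def zlij(target, begin, end, list_1, list_2):
--     # Index-pointer merge over the unchanged input lists (no slice copies).
--     # Mirrors A's behaviour exactly, including that list_1 is not advanced
--     # once list_2 is exhausted (A assigns to the misspelled name List_1).
--     n1, n2 = len(list_1), len(list_2)
--     i1 = i2 = 0
--     for i in range(begin, end):
--         if i1 == n1:
--             target[i] = list_2[i2]
--             i2 += 1
--         elif i2 == n2:
--             target[i] = list_1[i1]
--         elif list_1[i1] <= list_2[i2]:
--             target[i] = list_1[i1]
--             i1 += 1
--         else:
--             target[i] = list_2[i2]
--             i2 += 1
--     return target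
-- ===== Notes on version B (the rewrite author's own statement) =====
-- stated objective: alternative
-- what changed: B merges with two integer index pointers into the unchanged input lists instead of A's repeated re-slicing (copying) of the lists, reproducing A's behaviour exactly, including that list_1 is never advanced once list_2 is exhausted (A's List_1 typo).
import Mathlib
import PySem

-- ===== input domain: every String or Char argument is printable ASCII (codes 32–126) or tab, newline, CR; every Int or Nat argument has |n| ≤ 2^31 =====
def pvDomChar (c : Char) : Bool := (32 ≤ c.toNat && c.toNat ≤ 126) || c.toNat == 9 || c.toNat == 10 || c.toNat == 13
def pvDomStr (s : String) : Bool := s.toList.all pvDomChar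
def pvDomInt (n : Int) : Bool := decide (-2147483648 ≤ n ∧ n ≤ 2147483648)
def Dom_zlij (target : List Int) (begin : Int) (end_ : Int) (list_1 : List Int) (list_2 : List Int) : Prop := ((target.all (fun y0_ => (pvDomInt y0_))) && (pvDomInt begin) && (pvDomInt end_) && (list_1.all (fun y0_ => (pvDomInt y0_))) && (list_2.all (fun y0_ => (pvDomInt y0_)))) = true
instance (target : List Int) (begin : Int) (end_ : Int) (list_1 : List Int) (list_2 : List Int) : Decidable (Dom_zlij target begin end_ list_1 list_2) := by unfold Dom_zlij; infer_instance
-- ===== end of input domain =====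

-- B merges with two index pointers into the unchanged input lists instead of A's
-- per-step list slice copies, reproducing A's behaviour exactly (including the List_1 typo:
-- list_1 is never advanced once list_2 is exhausted). Both A and B mutate
-- `target` in place in Python; the equivalence proved here is about the
-- returned list (which is that same mutated list).

-- ===== PORT A =====
-- one loop step of A; state = (target, list_1, list_2)
def zlijStepA (s : List Int × List Int × List Int) (i : Int) : List Int × List Int × List Int :=
  let tgt := s.1
  let l1 := s.2.1
  let l2 := s.2.2
  if l1 = [] then
    (PySem.List.pySetD tgt i (PySem.List.pyGetD l2 0 0), l1, PySem.List.slice l2 (some 1) none)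
  else if l2 = [] then
    -- A's typo: `List_1 = list_1[1:]` binds an unused name, list_1 is unchanged
    (PySem.List.pySetD tgt i (PySem.List.pyGetD l1 0 0), l1, l2)
  else
    let element := min (PySem.List.pyGetD l1 0 0) (PySem.List.pyGetD l2 0 0)
    if element = PySem.List.pyGetD l1 0 0 then
      (PySem.List.pySetD tgt i element, PySem.List.slice l1 (some 1) none, l2)
    else
      (PySem.List.pySetD tgt i element, l1, PySem.List.slice l2 (some 1) none)

def zlij (target : List Int) (begin : Int) (end_ : Int) (list_1 : List Int) (list_2 : List Int) : List Int :=
  ((PySem.List.pyRange begin end_ 1).foldl zlijStepA (target, list_1, list_2)).1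

-- ===== PORT B =====
-- one loop step of B; state = (target, i1, i2)
def zlijStepB (list_1 list_2 : List Int) (s : List Int × Int × Int) (i : Int) : List Int × Int × Int :=
  let tgt := s.1
  let i1 := s.2.1
  let i2 := s.2.2
  if i1 = (list_1.length : Int) then
    (PySem.List.pySetD tgt i (PySem.List.pyGetD list_2 i2 0), i1, i2 + 1)
  else if i2 = (list_2.length : Int) then
    (PySem.List.pySetD tgt i (PySem.List.pyGetD list_1 i1 0), i1, i2)
  else if PySem.List.pyGetD list_1 i1 0 ≤ PySem.List.pyGetD list_2 i2 0 then
    (PySem.List.pySetD tgt i (PySem.List.pyGetD list_1 i1 0), i1 + 1, i2)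
  else
    (PySem.List.pySetD tgt i (PySem.List.pyGetD list_2 i2 0), i1, i2 + 1)

def zlij_alt (target : List Int) (begin : Int) (end_ : Int) (list_1 : List Int) (list_2 : List Int) : List Int :=
  ((PySem.List.pyRange begin end_ 1).foldl (zlijStepB list_1 list_2) (target, 0, 0)).1

-- ===== PRECONDITION & SPEC =====
-- Whether A raises depends on which input list the min-merge exhausts first:
-- `drainsFirst l1 l2 = true` iff the merge (ties to l1, as in A) empties l1 while
-- l2 still has elements left to consume (or l1 is empty from the start).
def drainsFirst : List Int → List Int → Bool
  | l1, [] => l1.isEmpty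
  | l1, b :: l2 =>
    match l1.dropWhile (fun a => a ≤ b) with
    | [] => true
    | a :: l1' => drainsFirst (a :: l1') l2

-- Pre_ excludes exactly the inputs on which Python A raises (IndexError): a target
-- index of the range out of bounds, or — only when list_1 drains before list_2, since
-- otherwise A's typo branch repeats list_1[0] forever without raising — a range longer
-- than the list_1[0:]+list_2 elements available, so that `list_2[0]` hits an empty list.
def Pre_zlij (target : List Int) (begin : Int) (end_ : Int) (list_1 : List Int) (list_2 : List Int) : Prop :=
  begin < end_ →
    (-(target.length : Int) ≤ begin ∧ end_ ≤ (target.length : Int) ∧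
      (drainsFirst list_1 list_2 = true →
        end_ - begin ≤ (list_1.length : Int) + (list_2.length : Int)))
instance (target : List Int) (begin : Int) (end_ : Int) (list_1 : List Int) (list_2 : List Int) : Decidable (Pre_zlij target begin end_ list_1 list_2) := by unfold Pre_zlij; infer_instance

def pvWitness_zlij : List Int × Int × Int × List Int × List Int := ([0, 0, 0, 0], 0, 4, [1, 3], [2, 4])

def Spec_zlij (target : List Int) (begin : Int) (end_ : Int) (list_1 : List Int) (list_2 : List Int) (out : List Int) : Prop := out = zlij_alt target begin end_ list_1 list_2
instance (target : List Int) (begin : Int) (end_ : Int) (list_1 : List Int) (list_2 : List Int) (out : List Int) : Decidable (Spec_zlij target begin end_ list_1 list_2 out) := by unfold Spec_zlij; infer_instance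

-- ===== CLAIM (what is proved, stated in full; the proofs are below) =====
def Claim_equal_zlij : Prop := ∀ (target : List Int) (begin : Int) (end_ : Int) (list_1 : List Int) (list_2 : List Int), Dom_zlij target begin end_ list_1 list_2 → Pre_zlij target begin end_ list_1 list_2 → Spec_zlij target begin end_ list_1 list_2 (zlij target begin end_ list_1 list_2)

-- ===== LEMMAS AND PROOFS =====

-- the head of the i-th suffix is the i-th element (shared-default form)
lemma pyGetD_drop_zero (l : List Int) (i : Int) (hi : 0 ≤ i) :
    PySem.List.pyGetD (l.drop i.toNat) 0 0 = PySem.List.pyGetD l i 0 := by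
  obtain ⟨n, rfl⟩ := Int.eq_ofNat_of_zero_le hi
  simp [PySem.List.pyGetD_zero, PySem.List.pyGetD_natCast, List.getD, List.getElem?_drop]

lemma slice_one_drop (l : List Int) (k : Nat) :
    PySem.List.slice (l.drop k) (some 1) none = l.drop (k + 1) := by
  have : ((1 : Int)) = ((1 : Nat) : Int) := by norm_num
  rw [this, PySem.List.slice_from_natCast, List.drop_drop]

-- main invariant: A's fold on list suffixes tracks B's fold on index pointers
lemma fold_eq (list_1 list_2 : List Int) :
    ∀ (r : List Int) (tgt : List Int) (i1 i2 : Int),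
      0 ≤ i1 → 0 ≤ i2 → i1 ≤ (list_1.length : Int) →
      (i1 < (list_1.length : Int) → i2 ≤ (list_2.length : Int)) →
      r.foldl zlijStepA (tgt, list_1.drop i1.toNat, list_2.drop i2.toNat) =
        (fun s : List Int × Int × Int => (s.1, list_1.drop s.2.1.toNat, list_2.drop s.2.2.toNat))
          (r.foldl (zlijStepB list_1 list_2) (tgt, i1, i2)) := by
  intro r
  induction r with
  | nil => intro tgt i1 i2 _ _ _ _; rfl
  | cons i rest ih =>
    intro tgt i1 i2 h1 h2 h3 h4
    simp only [List.foldl_cons]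
    have hd1 : list_1.drop i1.toNat = [] ↔ i1 = (list_1.length : Int) := by
      rw [List.drop_eq_nil_iff]; omega
    have hd2 : i1 < (list_1.length : Int) → (list_2.drop i2.toNat = [] ↔ i2 = (list_2.length : Int)) := by
      intro h; rw [List.drop_eq_nil_iff]; have := h4 h; omega
    by_cases hc1 : i1 = (list_1.length : Int)
    · -- branch 1: list_1 exhausted, consume list_2
      have hAe : list_1.drop i1.toNat = [] := hd1.mpr hc1
      have hstep : zlijStepA (tgt, list_1.drop i1.toNat, list_2.drop i2.toNat) i =
          (PySem.List.pySetD tgt i (PySem.List.pyGetD list_2 i2 0),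
            list_1.drop i1.toNat, list_2.drop (i2 + 1).toNat) := by
        simp only [zlijStepA]
        rw [if_pos hAe, pyGetD_drop_zero list_2 i2 h2, slice_one_drop,
          show i2.toNat + 1 = (i2 + 1).toNat from by omega]
      rw [hstep]
      have hB : zlijStepB list_1 list_2 (tgt, i1, i2) i =
          (PySem.List.pySetD tgt i (PySem.List.pyGetD list_2 i2 0), i1, i2 + 1) := by
        simp only [zlijStepB, if_pos hc1]
      rw [hB]
      exact ih _ i1 (i2 + 1) h1 (by omega) h3 (fun h => absurd hc1 (by omega))
    · have hi1lt : i1 < (list_1.length : Int) := lt_of_le_of_ne h3 hc1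
      have hAne : ¬ list_1.drop i1.toNat = [] := fun h => hc1 (hd1.mp h)
      by_cases hc2 : i2 = (list_2.length : Int)
      · -- branch 2 (A's typo branch): list_2 exhausted, pointers frozen
        have hBe : list_2.drop i2.toNat = [] := (hd2 hi1lt).mpr hc2
        have hstep : zlijStepA (tgt, list_1.drop i1.toNat, list_2.drop i2.toNat) i =
            (PySem.List.pySetD tgt i (PySem.List.pyGetD list_1 i1 0),
              list_1.drop i1.toNat, list_2.drop i2.toNat) := by
          simp only [zlijStepA]
          rw [if_neg hAne, if_pos hBe, pyGetD_drop_zero list_1 i1 h1]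
        rw [hstep]
        have hB : zlijStepB list_1 list_2 (tgt, i1, i2) i =
            (PySem.List.pySetD tgt i (PySem.List.pyGetD list_1 i1 0), i1, i2) := by
          simp only [zlijStepB, if_neg hc1, if_pos hc2]
        rw [hB]
        exact ih _ i1 i2 h1 h2 h3 h4
      · -- branch 3: genuine merge step
        have hi2lt : i2 < (list_2.length : Int) := lt_of_le_of_ne (h4 hi1lt) hc2
        have hBne : ¬ list_2.drop i2.toNat = [] := fun h => hc2 ((hd2 hi1lt).mp h)
        set a := PySem.List.pyGetD list_1 i1 0 with ha
        set b := PySem.List.pyGetD list_2 i2 0 with hb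
        have hga : PySem.List.pyGetD (list_1.drop i1.toNat) 0 0 = a := pyGetD_drop_zero list_1 i1 h1
        have hgb : PySem.List.pyGetD (list_2.drop i2.toNat) 0 0 = b := pyGetD_drop_zero list_2 i2 h2
        by_cases hle : a ≤ b
        · have hmin : min a b = a := min_eq_left hle
          have hstep : zlijStepA (tgt, list_1.drop i1.toNat, list_2.drop i2.toNat) i =
              (PySem.List.pySetD tgt i a, list_1.drop (i1 + 1).toNat, list_2.drop i2.toNat) := by
            simp only [zlijStepA]
            rw [if_neg hAne, if_neg hBne, hga, hgb, hmin, if_pos rfl, slice_one_drop,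
              show i1.toNat + 1 = (i1 + 1).toNat from by omega]
          rw [hstep]
          have hB : zlijStepB list_1 list_2 (tgt, i1, i2) i =
              (PySem.List.pySetD tgt i a, i1 + 1, i2) := by
            simp only [zlijStepB, if_neg hc1, if_neg hc2, ← ha, ← hb, if_pos hle]
          rw [hB]
          exact ih _ (i1 + 1) i2 (by omega) h2 (by omega) (fun _ => h4 hi1lt)
        · have hmin : min a b = b := min_eq_right (le_of_not_ge hle)
          have hne : ¬ b = a := by intro h; exact hle (le_of_eq h.symm)
          have hstep : zlijStepA (tgt, list_1.drop i1.toNat, list_2.drop i2.toNat) i =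
              (PySem.List.pySetD tgt i b, list_1.drop i1.toNat, list_2.drop (i2 + 1).toNat) := by
            simp only [zlijStepA]
            rw [if_neg hAne, if_neg hBne, hga, hgb, hmin, if_neg hne, slice_one_drop,
              show i2.toNat + 1 = (i2 + 1).toNat from by omega]
          rw [hstep]
          have hB : zlijStepB list_1 list_2 (tgt, i1, i2) i =
              (PySem.List.pySetD tgt i b, i1, i2 + 1) := by
            simp only [zlijStepB, if_neg hc1, if_neg hc2, ← ha, ← hb, if_neg hle]
          rw [hB]
          exact ih _ i1 (i2 + 1) h1 (by omega) h3 (fun h => by omega)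

-- ===== VERDICT (by name: the statement is the Claim_ definition above) =====
theorem zlij_spec : Claim_equal_zlij := by
  intro target begin end_ list_1 list_2 _ _
  unfold Spec_zlij zlij zlij_alt
  have h := fold_eq list_1 list_2 (PySem.List.pyRange begin end_ 1) target 0 0
    le_rfl le_rfl (by positivity) (fun _ => by positivity)
  simpa using congrArg (·.1) h
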